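-- pv_equiv track=rewrite | github.com/pragyan-divami/decision_framework | app/decision_engine.py | infer_threshold_hints
-- ===== SOURCE A (Python) =====
-- from typing import Any, Dict, List, Optional, Tuple
--
-- def infer_threshold_hints(label: str, unit: str) -> List[str]:
--     hints: List[str] = []
--     combined = f"{label} {unit}".lower()
--     if "days" in combined or "weeks" in combined or "months" in combined:
--         hints.append("time-sensitive")
--     if "low / medium / high" in combined:
--         hints.append("tiered-risk")
--     if "1–5" in combined or "1-5" in combined or "score" in combined:
--         hints.append("ordinal-scale")
--     if "per 10,000" in combined or "%" in combined:
--         hints.append("rate-threshold")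
--     if any(token in combined for token in ("₹", "$", "€", "cr", "crore", "million")):
--         hints.append("financial-threshold")
--     return hints
-- ===== SOURCE B (Python) =====
-- TOKEN_TAG = [
--     ("days", "time-sensitive"), ("weeks", "time-sensitive"), ("months", "time-sensitive"),
--     ("low / medium / high", "tiered-risk"),
--     ("1\u20135", "ordinal-scale"), ("1-5", "ordinal-scale"), ("score", "ordinal-scale"),
--     ("per 10,000", "rate-threshold"), ("%", "rate-threshold"),
--     ("\u20b9", "financial-threshold"), ("$", "financial-threshold"), ("\u20ac", "financial-threshold"),
--     ("cr", "financial-threshold"), ("crore", "financial-threshold"), ("million", "financial-threshold"),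
-- ]
-- TAG_ORDER = ["time-sensitive", "tiered-risk", "ordinal-scale", "rate-threshold", "financial-threshold"]
--
-- def infer_threshold_hints(label: str, unit: str):
--     # Single left-to-right scan of the combined text: at each position, record the
--     # tag of every token that starts there; emit matched tags in canonical order.
--     combined = (label + " " + unit).lower()
--     matched = set()
--     for i in range(len(combined)):
--         for token, tag in TOKEN_TAG:
--             if combined.startswith(token, i):
--                 matched.add(tag)
--     return [tag for tag in TAG_ORDER if tag in matched]
-- ===== Notes on version B (the rewrite author's own statement) =====
-- stated objective: alternative
-- what changed: Instead of five independent substring tests over an if/append chain, B makes a single left-to-right scan of the combined lowercased text, at each position recording into a set the tag of every token that starts there, then emits the matched tags in canonical order.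
import Mathlib
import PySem

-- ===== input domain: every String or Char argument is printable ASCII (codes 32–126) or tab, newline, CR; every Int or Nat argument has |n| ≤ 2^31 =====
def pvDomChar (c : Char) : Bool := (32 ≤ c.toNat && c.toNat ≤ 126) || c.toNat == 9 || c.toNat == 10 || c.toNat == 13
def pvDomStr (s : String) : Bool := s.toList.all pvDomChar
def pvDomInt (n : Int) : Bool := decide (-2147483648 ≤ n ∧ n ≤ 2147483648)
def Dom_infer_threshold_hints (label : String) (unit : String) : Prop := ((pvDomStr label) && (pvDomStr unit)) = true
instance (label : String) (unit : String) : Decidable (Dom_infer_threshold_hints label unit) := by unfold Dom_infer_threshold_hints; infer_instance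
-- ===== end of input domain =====

-- B replaces A's five independent substring tests (if/append chain) by one left-to-right
-- scan of the combined text that records in a set the tag of every token starting at each
-- position, then emits the matched tags in canonical order; no speed claim, different algorithm.


-- ===== PORT A =====
def infer_threshold_hints (label : String) (unit : String) : List String :=
  let combined := PySem.Chars.lower (label.toList ++ ' ' :: unit.toList)
  let hints : List String := []
  let hints := if PySem.Chars.isIn "days".toList combined || PySem.Chars.isIn "weeks".toList combined
      || PySem.Chars.isIn "months".toList combined then hints ++ ["time-sensitive"] else hints
  let hints := if PySem.Chars.isIn "low / medium / high".toList combined then hints ++ ["tiered-risk"] else hints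
  let hints := if PySem.Chars.isIn "1–5".toList combined || PySem.Chars.isIn "1-5".toList combined
      || PySem.Chars.isIn "score".toList combined then hints ++ ["ordinal-scale"] else hints
  let hints := if PySem.Chars.isIn "per 10,000".toList combined || PySem.Chars.isIn "%".toList combined
      then hints ++ ["rate-threshold"] else hints
  let hints := if (["₹", "$", "€", "cr", "crore", "million"].any
      (fun t => PySem.Chars.isIn t.toList combined)) then hints ++ ["financial-threshold"] else hints
  hints

-- ===== PORT B =====
def pvTokenTag : List (List Char × String) :=
  [ ("days".toList, "time-sensitive"), ("weeks".toList, "time-sensitive"), ("months".toList, "time-sensitive"),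
    ("low / medium / high".toList, "tiered-risk"),
    ("1–5".toList, "ordinal-scale"), ("1-5".toList, "ordinal-scale"), ("score".toList, "ordinal-scale"),
    ("per 10,000".toList, "rate-threshold"), ("%".toList, "rate-threshold"),
    ("₹".toList, "financial-threshold"), ("$".toList, "financial-threshold"), ("€".toList, "financial-threshold"),
    ("cr".toList, "financial-threshold"), ("crore".toList, "financial-threshold"), ("million".toList, "financial-threshold") ]

def pvTagOrder : List String :=
  ["time-sensitive", "tiered-risk", "ordinal-scale", "rate-threshold", "financial-threshold"]

def infer_threshold_hints_alt (label : String) (unit : String) : List String :=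
  let combined := PySem.Chars.lower (label.toList ++ ' ' :: unit.toList)
  let matched : PySem.Set String :=
    (List.range combined.length).foldl
      (fun m i => pvTokenTag.foldl
        (fun m p => if p.1.isPrefixOf (combined.drop i) then PySem.Set.add m p.2 else m) m)
      PySem.Set.empty
  pvTagOrder.filter (fun tag => matched.contains tag)

-- ===== PRECONDITION & SPEC =====
def Spec_infer_threshold_hints (label : String) (unit : String) (out : List String) : Prop := out = infer_threshold_hints_alt label unit
instance (label : String) (unit : String) (out : List String) : Decidable (Spec_infer_threshold_hints label unit out) := by unfold Spec_infer_threshold_hints; infer_instance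

-- ===== CLAIM (what is proved, stated in full; the proofs are below) =====
def Claim_equal_infer_threshold_hints : Prop := ∀ (label : String) (unit : String), Dom_infer_threshold_hints label unit → Spec_infer_threshold_hints label unit (infer_threshold_hints label unit)

-- ===== LEMMAS AND PROOFS =====

-- membership after a conditional Set.add
theorem pv_contains_add (m : PySem.Set String) (x t : String) :
    (PySem.Set.add m x).contains t = (m.contains t || x == t) := by
  simp only [PySem.Set.add]
  split
  · rename_i h
    by_cases hx : x = t
    · subst hx; simp_all
    · simp [hx]
  · by_cases hx : x = t
    · subst hx; simp
    · simp [hx, Ne.symm hx]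

-- membership through a fold whose step conditionally adds
theorem pv_contains_foldl {ι : Type} (t : String) (g : ι → Bool)
    (step : PySem.Set String → ι → PySem.Set String)
    (h : ∀ m i, (step m i).contains t = (m.contains t || g i)) :
    ∀ (l : List ι) (m : PySem.Set String),
      (l.foldl step m).contains t = (m.contains t || l.any g) := by
  intro l
  induction l with
  | nil => simp
  | cons a l ih =>
    intro m
    rw [List.foldl_cons, ih, h, List.any_cons, ← Bool.or_assoc]

-- swapping the two 'any' quantifiers
theorem pv_any_swap {a b : Type} (l1 : List a) (l2 : List b) (f : a → b → Bool) :
    l1.any (fun i => l2.any (fun p => f i p)) = l2.any (fun p => l1.any (fun i => f i p)) := by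
  rw [Bool.eq_iff_iff]
  simp only [List.any_eq_true]
  exact ⟨fun ⟨i, hi, p, hp, h⟩ => ⟨p, hp, i, hi, h⟩, fun ⟨p, hp, i, hi, h⟩ => ⟨i, hi, p, hp, h⟩⟩

theorem pv_any_false {α : Type} (l : List α) : (l.any (fun _ => false)) = false := by simp

-- a nonempty token occurs as a substring iff it is a prefix at some scanned position
theorem pv_any_prefix_eq_isIn (t s : List Char) (ht : t ≠ []) :
    (List.range s.length).any (fun i => t.isPrefixOf (s.drop i)) = PySem.Chars.isIn t s := by
  rw [Bool.eq_iff_iff]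
  simp only [List.any_eq_true, List.mem_range, List.isPrefixOf_iff_prefix]
  constructor
  · rintro ⟨i, _, hp⟩
    exact (PySem.Chars.exists_prefix_drop_iff_isIn _ _).mp ⟨i, hp⟩
  · intro h
    obtain ⟨j, hp⟩ := (PySem.Chars.exists_prefix_drop_iff_isIn _ _).mpr h
    by_cases hj : j < s.length
    · exact ⟨j, hj, hp⟩
    · exfalso
      rw [List.drop_eq_nil_of_le (by omega)] at hp
      exact ht (List.prefix_nil.mp hp)

-- ===== VERDICT (by name: the statement is the Claim_ definition above) =====
set_option maxHeartbeats 2000000 in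
theorem infer_threshold_hints_spec : Claim_equal_infer_threshold_hints := by
  intro label unit _
  unfold Spec_infer_threshold_hints infer_threshold_hints infer_threshold_hints_alt
  set combined := PySem.Chars.lower (label.toList ++ ' ' :: unit.toList) with hc
  have hfold : ∀ t : String,
      ((List.range combined.length).foldl
        (fun m i => pvTokenTag.foldl
          (fun m p => if p.1.isPrefixOf (combined.drop i) then PySem.Set.add m p.2 else m) m)
        PySem.Set.empty).contains t
      = pvTokenTag.any (fun p =>
          (List.range combined.length).any
            (fun i => p.1.isPrefixOf (combined.drop i) && (p.2 == t))) := by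
    intro t
    rw [pv_contains_foldl t
        (fun i => pvTokenTag.any (fun p => p.1.isPrefixOf (combined.drop i) && (p.2 == t))) _
        (fun m i => by
          rw [pv_contains_foldl t (fun p => p.1.isPrefixOf (combined.drop i) && (p.2 == t)) _
            (fun m p => by
              split
              · rename_i hp; rw [pv_contains_add]; simp [hp]
              · rename_i hp; simp [hp])
            pvTokenTag m])]
    rw [pv_any_swap]
    simp [PySem.Set.empty]
  simp only [pvTagOrder, List.filter_cons, List.filter_nil, hfold]
  simp only [pvTokenTag, List.any_cons, List.any_nil, Bool.or_false, String.reduceBEq,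
    beq_self_eq_true, Bool.and_true, Bool.and_false, pv_any_false, Bool.false_or, Bool.or_false]
  simp only [pv_any_prefix_eq_isIn _ _ (by decide : ("days".toList : List Char) ≠ []),
    pv_any_prefix_eq_isIn _ _ (by decide : ("weeks".toList : List Char) ≠ []),
    pv_any_prefix_eq_isIn _ _ (by decide : ("months".toList : List Char) ≠ []),
    pv_any_prefix_eq_isIn _ _ (by decide : ("low / medium / high".toList : List Char) ≠ []),
    pv_any_prefix_eq_isIn _ _ (by decide : ("1–5".toList : List Char) ≠ []),
    pv_any_prefix_eq_isIn _ _ (by decide : ("1-5".toList : List Char) ≠ []),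
    pv_any_prefix_eq_isIn _ _ (by decide : ("score".toList : List Char) ≠ []),
    pv_any_prefix_eq_isIn _ _ (by decide : ("per 10,000".toList : List Char) ≠ []),
    pv_any_prefix_eq_isIn _ _ (by decide : ("%".toList : List Char) ≠ []),
    pv_any_prefix_eq_isIn _ _ (by decide : ("₹".toList : List Char) ≠ []),
    pv_any_prefix_eq_isIn _ _ (by decide : ("$".toList : List Char) ≠ []),
    pv_any_prefix_eq_isIn _ _ (by decide : ("€".toList : List Char) ≠ []),
    pv_any_prefix_eq_isIn _ _ (by decide : ("cr".toList : List Char) ≠ []),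
    pv_any_prefix_eq_isIn _ _ (by decide : ("crore".toList : List Char) ≠ []),
    pv_any_prefix_eq_isIn _ _ (by decide : ("million".toList : List Char) ≠ [])]
  simp only [Bool.or_assoc]
  split_ifs <;> rfl
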